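-- pv_equiv track=rewrite | github.com/toki-plus/AB-Video-Deduplicator | src/main.py | get_a_positions
-- ===== SOURCE A (Python) =====
-- def get_a_positions(fps, N_a):
--     if fps == 60:
--         return {m if m <= 2 else 2 + 2 * (m - 2) for m in range(N_a)}
--     elif fps == 120:
--         return {m if m <= 1 else 1 + 4 * (m - 1) for m in range(N_a)}
--     elif fps == 240:
--         if N_a == 0: return set()
--         if N_a <= 2: return set(range(N_a))
--         positions = {0, 1}
--         next_pos = 1
--         intervals = [8, 9, 7]
--         for i in range(2, N_a):
--             next_pos += intervals[(i - 2) % 3]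
--             positions.add(next_pos)
--         return positions
--     else:
--         raise ValueError("不支持的帧率！")
-- ===== SOURCE B (Python) =====
-- # Table-driven closed form: each supported fps is (threshold k, cycle sum, cumulative offsets);
-- # position m is m itself up to k, then k + cycle*((m-k-1)//p) + offsets[(m-k-1)%p].
-- _PATTERNS = {60: (2, 2, [2]), 120: (1, 4, [4]), 240: (1, 24, [8, 17, 24])}
--
--
-- def _pos(m, k, cycle, pre):
--     if m <= k:
--         return m
--     q, r = divmod(m - k - 1, len(pre))
--     return k + cycle * q + pre[r]
--
--
-- def get_a_positions(fps, N_a):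
--     if fps not in _PATTERNS:
--         raise ValueError("不支持的帧率！")
--     k, cycle, pre = _PATTERNS[fps]
--     return {_pos(m, k, cycle, pre) for m in range(N_a)}
-- ===== Notes on version B (the rewrite author's own statement) =====
-- stated objective: alternative
-- what changed: Replaces the three per-fps branches (including the 240-fps running-sum loop with mutable next_pos/intervals state) by one table of (threshold, cycle-sum, cumulative offsets) per fps and a single closed-form comprehension computing each position directly by divmod.
import Mathlib
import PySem

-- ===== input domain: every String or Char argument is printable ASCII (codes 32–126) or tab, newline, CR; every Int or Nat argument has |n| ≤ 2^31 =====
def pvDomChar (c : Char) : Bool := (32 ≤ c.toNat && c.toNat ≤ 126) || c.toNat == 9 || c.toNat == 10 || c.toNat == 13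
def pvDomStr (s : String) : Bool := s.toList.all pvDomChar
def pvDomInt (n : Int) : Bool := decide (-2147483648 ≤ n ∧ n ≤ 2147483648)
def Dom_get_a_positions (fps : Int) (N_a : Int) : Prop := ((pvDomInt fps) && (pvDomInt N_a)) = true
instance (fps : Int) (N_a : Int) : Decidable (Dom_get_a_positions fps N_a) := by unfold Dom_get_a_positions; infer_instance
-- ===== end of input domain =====

-- B replaces A's running-sum loop for the 240 branch (and the per-fps comprehensions) by one
-- table-driven closed-form comprehension; same values, no speed claim ('alternative').

-- ===== PORT A =====
def get_a_positions (fps : Int) (N_a : Int) : List Int :=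
  if fps = 60 then
    PySem.Set.ofList ((PySem.List.pyRange 0 N_a 1).map (fun m => if m ≤ 2 then m else 2 + 2 * (m - 2)))
  else if fps = 120 then
    PySem.Set.ofList ((PySem.List.pyRange 0 N_a 1).map (fun m => if m ≤ 1 then m else 1 + 4 * (m - 1)))
  else if fps = 240 then
    if N_a = 0 then PySem.Set.empty
    else if N_a ≤ 2 then PySem.Set.ofList (PySem.List.pyRange 0 N_a 1)
    else
      (((PySem.List.pyRange 2 N_a 1).foldl
        (fun (st : List Int × Int) i =>
          let np := st.2 + PySem.List.pyGetD ([8, 9, 7] : List Int) (PySem.Int.mod (i - 2) 3) 0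
          (PySem.Set.add st.1 np, np))
        (PySem.Set.ofList [0, 1], 1))).1
  else []  -- Python raises ValueError here: excluded by Pre_

-- ===== PORT B =====
def pvPatterns : PySem.Dict Int (Int × Int × List Int) :=
  PySem.Dict.ofList [(60, (2, 2, [2])), (120, (1, 4, [4])), (240, (1, 24, [8, 17, 24]))]

def pvPos (m k cycle : Int) (pre : List Int) : Int :=
  if m ≤ k then m
  else
    let q := PySem.Int.floordiv (m - k - 1) (pre.length : Int)
    let r := PySem.Int.mod (m - k - 1) (pre.length : Int)
    k + cycle * q + PySem.List.pyGetD pre r 0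

def get_a_positions_alt (fps : Int) (N_a : Int) : List Int :=
  if PySem.Dict.contains pvPatterns fps = false then []  -- Python raises ValueError here: excluded by Pre_
  else
    let t := (PySem.Dict.get? pvPatterns fps).getD (0, 0, [])
    PySem.Set.ofList ((PySem.List.pyRange 0 N_a 1).map (fun m => pvPos m t.1 t.2.1 t.2.2))

-- ===== PRECONDITION & SPEC =====
-- Pre_ excludes exactly the unsupported frame rates, on which A raises ValueError (B raises too).
def Pre_get_a_positions (fps : Int) (N_a : Int) : Prop := fps = 60 ∨ fps = 120 ∨ fps = 240
instance (fps : Int) (N_a : Int) : Decidable (Pre_get_a_positions fps N_a) := by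
  unfold Pre_get_a_positions; infer_instance
def pvWitness_get_a_positions : Int × Int := (240, 7)

def Spec_get_a_positions (fps : Int) (N_a : Int) (out : List Int) : Prop := out = get_a_positions_alt fps N_a
instance (fps : Int) (N_a : Int) (out : List Int) : Decidable (Spec_get_a_positions fps N_a out) := by
  unfold Spec_get_a_positions; infer_instance

-- ===== CLAIM (what is proved, stated in full; the proofs are below) =====
def Claim_equal_get_a_positions : Prop := ∀ (fps : Int) (N_a : Int), Dom_get_a_positions fps N_a → Pre_get_a_positions fps N_a → Spec_get_a_positions fps N_a (get_a_positions fps N_a)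

-- ===== LEMMAS AND PROOFS =====

-- B's closed-form position function for fps = 240
def g240 (m : Int) : Int := pvPos m 1 24 [8, 17, 24]

-- A's loop body for fps = 240
def stepA (st : List Int × Int) (i : Int) : List Int × Int :=
  let np := st.2 + PySem.List.pyGetD ([8, 9, 7] : List Int) (PySem.Int.mod (i - 2) 3) 0
  (PySem.Set.add st.1 np, np)

lemma g240_step (n : Nat) :
    g240 (2 + (n : Int)) = g240 (1 + (n : Int)) + PySem.List.pyGetD ([8, 9, 7] : List Int) (PySem.Int.mod ((n : Int)) 3) 0
    ∧ g240 (1 + (n : Int)) < g240 (2 + (n : Int)) := by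
  by_cases hn0 : n = 0
  · subst hn0; decide
  have h3 : (0 : Int) < 3 := by norm_num
  unfold g240 pvPos
  rw [if_neg (by omega : ¬ (2 + (n : Int) ≤ 1)), if_neg (by omega : ¬ (1 + (n : Int) ≤ 1))]
  rw [show ((([8, 17, 24] : List Int).length : Nat) : Int) = (3 : Int) from by norm_num]
  simp only [PySem.Int.floordiv_eq_ediv_of_pos h3, PySem.Int.mod_eq_emod_of_pos h3]
  have e1 : (2 + (n : Int) - 1 - 1) = (n : Int) := by ring
  have e2 : (1 + (n : Int) - 1 - 1) = (n : Int) - 1 := by ring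
  rw [e1, e2]
  obtain ⟨q, r, hr, hn⟩ : ∃ q r, r < 3 ∧ n = 3 * q + r := ⟨n / 3, n % 3, by omega, by omega⟩
  have hni : (n : Int) = 3 * (q : Int) + (r : Int) := by push_cast [hn]; ring
  have g8 : PySem.List.pyGetD ([8, 17, 24] : List Int) 0 0 = 8 := by decide
  have g17 : PySem.List.pyGetD ([8, 17, 24] : List Int) 1 0 = 17 := by decide
  have g24 : PySem.List.pyGetD ([8, 17, 24] : List Int) 2 0 = 24 := by decide
  have i8 : PySem.List.pyGetD ([8, 9, 7] : List Int) 0 0 = 8 := by decide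
  have i9 : PySem.List.pyGetD ([8, 9, 7] : List Int) 1 0 = 9 := by decide
  have i7 : PySem.List.pyGetD ([8, 9, 7] : List Int) 2 0 = 7 := by decide
  interval_cases r
  · -- r = 0, so q ≥ 1
    rw [show ((n : Int)) % 3 = 0 by omega, show ((n : Int)) / 3 = (q : Int) by omega,
      show ((n : Int) - 1) % 3 = 2 by omega, show ((n : Int) - 1) / 3 = (q : Int) - 1 by omega,
      g8, g24, i8]
    omega
  · rw [show ((n : Int)) % 3 = 1 by omega, show ((n : Int)) / 3 = (q : Int) by omega,
      show ((n : Int) - 1) % 3 = 0 by omega, show ((n : Int) - 1) / 3 = (q : Int) by omega,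
      g8, g17, i9]
    omega
  · rw [show ((n : Int)) % 3 = 2 by omega, show ((n : Int)) / 3 = (q : Int) by omega,
      show ((n : Int) - 1) % 3 = 1 by omega, show ((n : Int) - 1) / 3 = (q : Int) by omega,
      g17, g24, i7]
    omega

lemma loop240 (n : Nat) :
    (PySem.List.pyRange 2 (2 + (n : Int)) 1).foldl stepA (PySem.Set.ofList [0, 1], 1)
      = ([0, 1] ++ (PySem.List.pyRange 2 (2 + (n : Int)) 1).map g240, g240 (1 + (n : Int)))
    ∧ (∀ y ∈ ([0, 1] ++ (PySem.List.pyRange 2 (2 + (n : Int)) 1).map g240 : List Int), y ≤ g240 (1 + (n : Int)))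
    ∧ ([0, 1] ++ (PySem.List.pyRange 2 (2 + (n : Int)) 1).map g240 : List Int).Pairwise (· < ·) := by
  induction n with
  | zero =>
      rw [PySem.List.pyRange_one_eq_nil (by norm_num)]
      refine ⟨by decide, by decide, by decide⟩
  | succ n ih =>
      obtain ⟨hfold, hle, hpw⟩ := ih
      have hone : (1 : Int) + ((n + 1 : Nat) : Int) = 2 + (n : Int) := by push_cast; ring
      have hsplit : PySem.List.pyRange 2 (2 + ((n + 1 : Nat) : Int)) 1
          = PySem.List.pyRange 2 (2 + (n : Int)) 1 ++ [2 + (n : Int)] := by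
        rw [show (2 : Int) + ((n + 1 : Nat) : Int) = (2 + (n : Int)) + 1 by push_cast; ring,
          PySem.List.pyRange_one_succ_right (by omega)]
      obtain ⟨hstep, hlt⟩ := g240_step n
      have hnotmem : g240 (2 + (n : Int)) ∉ ([0, 1] ++ (PySem.List.pyRange 2 (2 + (n : Int)) 1).map g240 : List Int) := by
        intro hmem
        exact absurd (hle _ hmem) (by omega)
      have hmap : ([0, 1] ++ (PySem.List.pyRange 2 (2 + ((n + 1 : Nat) : Int)) 1).map g240 : List Int)
          = ([0, 1] ++ (PySem.List.pyRange 2 (2 + (n : Int)) 1).map g240) ++ [g240 (2 + (n : Int))] := by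
        rw [hsplit, List.map_append, List.map_cons, List.map_nil, List.append_assoc]
      refine ⟨?_, ?_, ?_⟩
      · rw [hsplit, List.foldl_append, hfold]
        simp only [List.foldl_cons, List.foldl_nil, stepA,
          show (2 + (n : Int)) - 2 = (n : Int) by ring, ← hstep,
          PySem.Set.add_of_not_mem hnotmem, List.map_append, List.map_cons, List.map_nil, hone,
          List.append_assoc]
      · intro y hy
        rw [hmap] at hy
        rw [hone]
        rcases List.mem_append.mp hy with hy | hy
        · exact le_of_lt (lt_of_le_of_lt (hle y hy) hlt)
        · rw [List.mem_singleton.mp hy]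
      · rw [hmap, List.pairwise_append]
        refine ⟨hpw, by simp, ?_⟩
        intro a ha b hb
        rw [List.mem_singleton.mp hb]
        exact lt_of_le_of_lt (hle a ha) hlt

lemma g240_nodup (n : Nat) :
    ([0, 1] ++ (PySem.List.pyRange 2 (2 + (n : Int)) 1).map g240 : List Int).Nodup :=
  ((loop240 n).2.2).imp (fun h => ne_of_lt h)

theorem get_a_positions_spec : Claim_equal_get_a_positions := by
  intro fps N_a _ hpre
  unfold Spec_get_a_positions get_a_positions get_a_positions_alt
  rcases hpre with h | h | h <;> subst h
  · -- fps = 60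
    rw [if_pos rfl, if_neg (by decide)]
    rw [show PySem.Dict.get? pvPatterns 60 = some (2, 2, [2]) from by decide]
    simp only [Option.getD_some]
    refine congrArg PySem.Set.ofList (List.map_congr_left fun m _ => ?_)
    unfold pvPos
    by_cases hm : m ≤ 2
    · simp [hm]
    · have h1 : (0 : Int) < 1 := by norm_num
      rw [if_neg hm, show ((([2] : List Int).length : Nat) : Int) = (1 : Int) from by norm_num]
      simp only [PySem.Int.floordiv_eq_ediv_of_pos h1, PySem.Int.mod_eq_emod_of_pos h1,
        Int.ediv_one, Int.emod_one]
      rw [show PySem.List.pyGetD ([2] : List Int) 0 0 = 2 from by decide, if_neg hm]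
      ring
  · -- fps = 120
    rw [if_neg (by norm_num), if_pos rfl, if_neg (by decide)]
    rw [show PySem.Dict.get? pvPatterns 120 = some (1, 4, [4]) from by decide]
    simp only [Option.getD_some]
    refine congrArg PySem.Set.ofList (List.map_congr_left fun m _ => ?_)
    unfold pvPos
    by_cases hm : m ≤ 1
    · simp [hm]
    · have h1 : (0 : Int) < 1 := by norm_num
      rw [if_neg hm, show ((([4] : List Int).length : Nat) : Int) = (1 : Int) from by norm_num]
      simp only [PySem.Int.floordiv_eq_ediv_of_pos h1, PySem.Int.mod_eq_emod_of_pos h1,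
        Int.ediv_one, Int.emod_one]
      rw [show PySem.List.pyGetD ([4] : List Int) 0 0 = 4 from by decide, if_neg hm]
      ring
  · -- fps = 240
    rw [if_neg (show ¬((240 : Int) = 60) from by norm_num),
      if_neg (show ¬((240 : Int) = 120) from by norm_num),
      if_pos (show (240 : Int) = 240 from rfl),
      if_neg (show ¬(PySem.Dict.contains pvPatterns 240 = false) from by decide)]
    rw [show PySem.Dict.get? pvPatterns 240 = some (1, 24, [8, 17, 24]) from by decide]
    simp only [Option.getD_some]
    by_cases h0 : N_a = 0
    · subst h0; decide
    by_cases h2 : N_a ≤ 2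
    · rw [if_neg h0, if_pos h2]
      by_cases hneg : N_a ≤ 0
      · rw [PySem.List.pyRange_one_eq_nil hneg]; decide
      · interval_cases N_a
        · decide
        · decide
    · rw [if_neg h0, if_neg h2]
      obtain ⟨n, hn⟩ : ∃ n : Nat, N_a = 2 + (n : Int) := ⟨(N_a - 2).toNat, by omega⟩
      subst hn
      have hA : (List.foldl
            (fun (st : List Int × Int) i =>
              let np := st.2 + PySem.List.pyGetD ([8, 9, 7] : List Int) (PySem.Int.mod (i - 2) 3) 0
              (PySem.Set.add st.1 np, np))
            (PySem.Set.ofList [0, 1], 1) (PySem.List.pyRange 2 (2 + (n : Int)) 1))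
          = (PySem.List.pyRange 2 (2 + (n : Int)) 1).foldl stepA (PySem.Set.ofList [0, 1], 1) := rfl
      rw [hA, (loop240 n).1]
      have hsplit : PySem.List.pyRange 0 (2 + (n : Int)) 1
          = PySem.List.pyRange 0 2 1 ++ PySem.List.pyRange 2 (2 + (n : Int)) 1 :=
        PySem.List.pyRange_one_append 0 2 (2 + (n : Int)) (by norm_num) (by omega)
      rw [hsplit, List.map_append]
      rw [show (PySem.List.pyRange 0 2 1).map (fun m => pvPos m 1 24 [8, 17, 24]) = ([0, 1] : List Int) from by decide]
      rw [show (PySem.List.pyRange 2 (2 + (n : Int)) 1).map (fun m => pvPos m 1 24 [8, 17, 24])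
          = (PySem.List.pyRange 2 (2 + (n : Int)) 1).map g240 from rfl]
      exact (PySem.Set.ofList_eq_self_of_nodup _ (g240_nodup n)).symm
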